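-- pv_equiv track=rewrite | github.com/terastion/ksm_collection_merger | merger.py | ntfs_strip
-- ===== SOURCE A (Python) =====
-- def ntfs_strip(string):
--     result = string
--     substitutions = {
--         '"|%:/,\\': ' ',
--         '[<': '(',
--         ']>': ')'
--     }
--     for (chs, sub) in substitutions.items():
--         for ch in chs:
--             if ch in result:
--                 result = result.replace(ch, sub)
--
--     # make sure result does not end in a space or period
--     while result[-1:] == ' ' or result[-1:] == '.':
--         result = result[:-1]
--
--     return result
-- ===== SOURCE B (Python) =====
-- def ntfs_strip(string):
--     table = {}
--     for ch in '"|%:/,\\':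
--         table[ch] = ' '
--     for ch in '[<':
--         table[ch] = '('
--     for ch in ']>':
--         table[ch] = ')'
--     return ''.join(table.get(ch, ch) for ch in string).rstrip(' .')
-- ===== Notes on version B (the rewrite author's own statement) =====
-- stated objective: idiomatic
-- what changed: Replaces ten sequential whole-string replace passes and a char-popping while loop by one substitution table built once, a single forward pass mapping each character through the table, and a strip of trailing spaces and periods.
import Mathlib
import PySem

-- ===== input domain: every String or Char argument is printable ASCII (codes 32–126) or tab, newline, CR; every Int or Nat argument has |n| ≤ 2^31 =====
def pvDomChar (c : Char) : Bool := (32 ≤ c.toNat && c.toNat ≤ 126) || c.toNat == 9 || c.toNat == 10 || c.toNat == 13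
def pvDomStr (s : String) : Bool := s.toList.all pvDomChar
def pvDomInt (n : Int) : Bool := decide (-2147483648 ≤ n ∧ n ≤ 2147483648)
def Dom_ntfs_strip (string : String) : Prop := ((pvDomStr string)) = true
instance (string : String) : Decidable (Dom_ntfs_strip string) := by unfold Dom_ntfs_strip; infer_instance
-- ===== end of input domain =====

-- B builds a char→char substitution table once and maps the string in a single forward pass,
-- then strips trailing spaces and periods, instead of A's ten whole-string replace passes and a char-popping while
-- loop; same return value (idiomatic rewrite).

-- ===== PORT A =====
-- 'if ch in result: result = result.replace(ch, sub)' for one substitution character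
def ntfsReplA (r : List Char) (ch : Char) (sub : Char) : List Char :=
  if PySem.Chars.isIn [ch] r then PySem.Chars.replace r [ch] [sub] else r

-- the substitutions dict of A, in insertion order
def ntfsSubsA : List (List Char × Char) :=
  [(['"', '|', '%', ':', '/', ',', '\\'], ' '), (['[', '<'], '('), ([']', '>'], ')')]

-- 'while result[-1:] == " " or result[-1:] == ".": result = result[:-1]'
def ntfsStripLoopA (r : List Char) : List Char :=
  if PySem.List.slice r (some (-1)) none = [' '] ∨ PySem.List.slice r (some (-1)) none = ['.']
  then ntfsStripLoopA (PySem.List.slice r none (some (-1)))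
  else r
termination_by r.length
decreasing_by
  rename_i h
  rw [PySem.List.slice_to_neg_one]
  rcases h with h | h <;>
  · rw [PySem.List.slice_from_neg_one] at h
    cases r with
    | nil => simp at h
    | cons a t => simp

def ntfs_strip (string : String) : String :=
  let result := ntfsSubsA.foldl (fun r p => p.1.foldl (fun r ch => ntfsReplA r ch p.2) r) string.toList
  String.ofList (ntfsStripLoopA result)

-- ===== PORT B =====
-- the table built by the three for-loops of Source B
def ntfsTableB : PySem.Dict Char Char :=
  let t : PySem.Dict Char Char := ⟨[]⟩
  let t := ['"', '|', '%', ':', '/', ',', '\\'].foldl (fun t ch => t.insert ch ' ') t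
  let t := ['[', '<'].foldl (fun t ch => t.insert ch '(') t
  [']', '>'].foldl (fun t ch => t.insert ch ')') t

-- rstrip(' .') ported by hand (exact): drop trailing chars in {' ', '.'}
def ntfsRstripB (r : List Char) : List Char :=
  (r.reverse.dropWhile (fun c => c == ' ' || c == '.')).reverse

def ntfs_strip_alt (string : String) : String :=
  String.ofList (ntfsRstripB (string.toList.map (fun ch => ntfsTableB.getD ch ch)))

-- ===== PRECONDITION & SPEC =====
def Spec_ntfs_strip (string : String) (out : String) : Prop := out = ntfs_strip_alt string
instance (string : String) (out : String) : Decidable (Spec_ntfs_strip string out) := by unfold Spec_ntfs_strip; infer_instance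

-- ===== CLAIM (what is proved, stated in full; the proofs are below) =====
def Claim_equal_ntfs_strip : Prop := ∀ (string : String), Dom_ntfs_strip string → Spec_ntfs_strip string (ntfs_strip string)

-- ===== LEMMAS AND PROOFS =====

-- one substitution character as a function on a single char
def pvSubst (c d x : Char) : Char := if x == c then d else x

-- single-character replace is a map over the characters
theorem ntfs_go_single (c d : Char) (l : List Char) : ∀ (acc : List Char) (fuel : Nat),
    l.length ≤ fuel →
    PySem.Chars.replace.go [c] [d] fuel l acc
      = acc.reverse ++ l.map (pvSubst c d) := by
  induction l with
  | nil =>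
    intro acc fuel h
    cases fuel <;> simp [PySem.Chars.replace.go]
  | cons a t ih =>
    intro acc fuel h
    cases fuel with
    | zero => simp at h
    | succ n =>
      rw [PySem.Chars.replace.go]
      by_cases hac : a = c
      · subst hac
        have hpre : [a].isPrefixOf (a :: t) = true := by simp [List.isPrefixOf]
        simp only [hpre, if_pos]
        rw [show List.drop ([a].length) (a :: t) = t from rfl,
            ih ([d].reverse ++ acc) n (Nat.le_of_succ_le_succ (by simpa using h))]
        simp [pvSubst]
      · have hpre : [c].isPrefixOf (a :: t) = false := by
          simp [List.isPrefixOf]; exact fun hca => absurd hca.symm hac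
        simp only [hpre, Bool.false_eq_true, if_neg, not_false_iff]
        rw [ih (a :: acc) n (Nat.le_of_succ_le_succ (by simpa using h))]
        simp [pvSubst, hac]

theorem ntfs_replace_single (r : List Char) (c d : Char) :
    PySem.Chars.replace r [c] [d] = r.map (pvSubst c d) := by
  rw [PySem.Chars.replace]
  simp only [List.isEmpty_cons, Bool.false_eq_true, if_neg, not_false_iff]
  simpa using ntfs_go_single c d r [] r.length le_rfl

theorem ntfs_singleton_infix_iff (c : Char) (r : List Char) : [c] <:+: r ↔ c ∈ r := by
  constructor
  · intro h; exact List.singleton_sublist.mp h.sublist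
  · intro h; obtain ⟨s, t, rfl⟩ := List.append_of_mem h
    exact ⟨s, t, by simp⟩

theorem ntfs_repl_map (r : List Char) (c d : Char) :
    ntfsReplA r c d = r.map (pvSubst c d) := by
  unfold ntfsReplA
  by_cases h : PySem.Chars.isIn [c] r
  · rw [if_pos h, ntfs_replace_single]
  · rw [if_neg h]
    have hc : c ∉ r := by
      have := (PySem.Chars.isIn_eq_false_iff _ _).mp (by simpa using h)
      exact fun hm => this ((ntfs_singleton_infix_iff c r).mpr hm)
    conv_lhs => rw [← List.map_id r]
    apply List.map_congr_left
    intro x hx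
    have hxc : x ≠ c := fun he => hc (he ▸ hx)
    simp [pvSubst, hxc]

-- one inner for-loop (over the chars of one key string) is a map of the composed per-char function
theorem ntfs_inner_fold (chs : List Char) (d : Char) : ∀ (r : List Char),
    chs.foldl (fun r ch => ntfsReplA r ch d) r
      = r.map (fun x => chs.foldl (fun x ch => pvSubst ch d x) x) := by
  induction chs with
  | nil => intro r; simp
  | cons c t ih =>
    intro r
    rw [List.foldl_cons, ntfs_repl_map, ih, List.map_map]
    simp [Function.comp]

-- the whole substitution loop is a map of the composed per-char function
theorem ntfs_outer_fold (ps : List (List Char × Char)) : ∀ (cs : List Char),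
    ps.foldl (fun r p => p.1.foldl (fun r ch => ntfsReplA r ch p.2) r) cs
      = cs.map (fun x => ps.foldl (fun x p => p.1.foldl (fun x ch => pvSubst ch p.2 x) x) x) := by
  induction ps with
  | nil => intro cs; simp
  | cons p t ih =>
    intro cs
    rw [List.foldl_cons, ntfs_inner_fold, ih, List.map_map]
    simp [Function.comp]

-- the composed per-char substitution is B's table lookup
theorem ntfs_pointwise (x : Char) :
    ntfsSubsA.foldl (fun x p => p.1.foldl (fun x ch => pvSubst ch p.2 x) x) x
      = ntfsTableB.getD x x := by
  have ht : ntfsTableB = ⟨[('"', ' '), ('|', ' '), ('%', ' '), (':', ' '), ('/', ' '),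
      (',', ' '), ('\\', ' '), ('[', '('), ('<', '('), (']', ')'), ('>', ')')]⟩ := by rfl
  rw [ht]
  by_cases e1 : x = '"'
  · subst e1; rfl
  by_cases e2 : x = '|'
  · subst e2; rfl
  by_cases e3 : x = '%'
  · subst e3; rfl
  by_cases e4 : x = ':'
  · subst e4; rfl
  by_cases e5 : x = '/'
  · subst e5; rfl
  by_cases e6 : x = ','
  · subst e6; rfl
  by_cases e7 : x = '\\'
  · subst e7; rfl
  by_cases e8 : x = '['
  · subst e8; rfl
  by_cases e9 : x = '<'
  · subst e9; rfl
  by_cases e10 : x = ']'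
  · subst e10; rfl
  by_cases e11 : x = '>'
  · subst e11; rfl
  have f1 : ('"' == x) = false := by simp [Ne.symm e1]
  have f2 : ('|' == x) = false := by simp [Ne.symm e2]
  have f3 : ('%' == x) = false := by simp [Ne.symm e3]
  have f4 : ((':' : Char) == x) = false := by simp [Ne.symm e4]
  have f5 : ('/' == x) = false := by simp [Ne.symm e5]
  have f6 : ((',' : Char) == x) = false := by simp [Ne.symm e6]
  have f7 : ('\\' == x) = false := by simp [Ne.symm e7]
  have f8 : ('[' == x) = false := by simp [Ne.symm e8]
  have f9 : ('<' == x) = false := by simp [Ne.symm e9]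
  have f10 : (']' == x) = false := by simp [Ne.symm e10]
  have f11 : ('>' == x) = false := by simp [Ne.symm e11]
  simp [ntfsSubsA, pvSubst, PySem.Dict.getD, PySem.Dict.get?, List.find?,
    e1, e2, e3, e4, e5, e6, e7, e8, e9, e10, e11,
    f1, f2, f3, f4, f5, f6, f7, f8, f9, f10, f11]

theorem ntfs_chain (cs : List Char) :
    ntfsSubsA.foldl (fun r p => p.1.foldl (fun r ch => ntfsReplA r ch p.2) r) cs
      = cs.map (fun ch => ntfsTableB.getD ch ch) := by
  rw [ntfs_outer_fold]
  exact List.map_congr_left (fun x _ => ntfs_pointwise x)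

theorem ntfs_strip_loop_eq (r : List Char) : ntfsStripLoopA r = ntfsRstripB r := by
  induction r using List.reverseRecOn with
  | nil =>
    rw [ntfsStripLoopA]
    simp [ntfsRstripB, PySem.List.slice_from_neg_one]
  | append_singleton ys y ih =>
    rw [ntfsStripLoopA]
    have hs : PySem.List.slice (ys ++ [y]) (some (-1)) none = [y] := by
      rw [PySem.List.slice_from_neg_one]; simp
    rw [hs, PySem.List.slice_to_neg_one, List.dropLast_concat]
    by_cases hy : y = ' ' ∨ y = '.'
    · rw [if_pos (by rcases hy with h | h <;> simp [h]), ih]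
      unfold ntfsRstripB
      have hrev : (ys ++ [y]).reverse = y :: ys.reverse := by simp
      rw [hrev, List.dropWhile_cons_of_pos (by rcases hy with h | h <;> simp [h])]
    · rw [if_neg (by rcases (not_or.mp hy) with ⟨h1, h2⟩; simp [h1, h2])]
      unfold ntfsRstripB
      have hrev : (ys ++ [y]).reverse = y :: ys.reverse := by simp
      rw [hrev, List.dropWhile_cons_of_neg (by rcases (not_or.mp hy) with ⟨h1, h2⟩; simp [h1, h2])]
      simp

-- ===== VERDICT (by name: the statement is the Claim_ definition above) =====
theorem ntfs_strip_spec : Claim_equal_ntfs_strip := by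
  intro s _
  unfold Spec_ntfs_strip ntfs_strip ntfs_strip_alt
  simp only [ntfs_chain, ntfs_strip_loop_eq]
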